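-- pv_equiv track=rewrite | github.com/munozhkl/21-MoreLoopsWithinLoops | src/m3_more_nested_loops_in_sequences.py | first_is_elsewhere_too
-- ===== SOURCE A (Python) =====
-- def first_is_elsewhere_too(seq_seq):
--     """
--     Given a sequence of subsequences:
--       -- Returns True if any element of the first (initial) subsequence
--            appears in any of the other subsequences.
--       -- Returns False otherwise.
--
--     For example, if the given argument is:
--         [(3, 1, 4),
--          (13, 10, 11, 7, 10),
--          [11, 12, 3, 10]]
--     then this function returns True because 3 appears
--     in the first subsequence and also in the third subsequence.
--
--     As another example, if the given argument is:
--         [(3, 1, 4),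
--          (13, 10, 11, 7, 10),
--          [11, 2, 13, 14]]
--     then this function returns False because 3 does not appear in
--     any subsequence except the first, 1 does not appear in any
--     subsequence except the first, and 4 does not appear in any
--     subsequence except the first.
--
--     As yet another example, if the given argument is:
--       ([], [1, 2], [1, 2])
--     then this function returns False since no element of the first
--     subsequence appears elsewhere.
--
--     Preconditions:
--       :type seq_seq: (list, tuple)
--     and the given argument is a sequence of sequences.
--     """
--     # ------------------------------------------------------------------
--     # done: 6. Implement and test this function.
--     #          Some tests are already written for you (above).
--     #
--     # IMPLEMENTATION RESTRICTION:
--     #   ** You may NOT use anything but comparison (==) in judging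
--     #      membership.  In particular, you may NOT use:
--     #        -- the IN operator
--     #              (example:  7 in [9, 6, 7, 9] returns True)
--     #        -- the COUNT method
--     #              (example:  [9, 6, 7, 9].count(9) returns 2)
--     #        -- the INDEX method
--     #              (example:  [9, 6, 7, 9, 6, 1].index(6) returns 1)
--     #   in this problem, as doing so would defeat the goal of providing
--     #   practice at loops within loops (within loops within ...)
--     # ------------------------------------------------------------------
--
--     for k in range(1, len(seq_seq)):
--         sublist = seq_seq[0]
--         sublist1 = seq_seq[k]
--         for m in range(len(sublist)):
--             num_to_look_for = sublist[m]
--             for n in range(len(sublist1)):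
--                 if sublist1[n] == num_to_look_for:
--                     return True
--     return False
-- ===== SOURCE B (Python) =====
-- def first_is_elsewhere_too(seq_seq):
--     if not seq_seq:
--         return False
--     others = set()
--     for sub in seq_seq[1:]:
--         others.update(sub)
--     return any(x in others for x in seq_seq[0])
-- ===== Notes on version B (the rewrite author's own statement) =====
-- stated objective: idiomatic
-- what changed: Replaces the triple nested index loops (rescanning the first subsequence against every other one) with building one set pooling the later subsequences' elements and a single any()-membership pass over the first subsequence.
import Mathlib
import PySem

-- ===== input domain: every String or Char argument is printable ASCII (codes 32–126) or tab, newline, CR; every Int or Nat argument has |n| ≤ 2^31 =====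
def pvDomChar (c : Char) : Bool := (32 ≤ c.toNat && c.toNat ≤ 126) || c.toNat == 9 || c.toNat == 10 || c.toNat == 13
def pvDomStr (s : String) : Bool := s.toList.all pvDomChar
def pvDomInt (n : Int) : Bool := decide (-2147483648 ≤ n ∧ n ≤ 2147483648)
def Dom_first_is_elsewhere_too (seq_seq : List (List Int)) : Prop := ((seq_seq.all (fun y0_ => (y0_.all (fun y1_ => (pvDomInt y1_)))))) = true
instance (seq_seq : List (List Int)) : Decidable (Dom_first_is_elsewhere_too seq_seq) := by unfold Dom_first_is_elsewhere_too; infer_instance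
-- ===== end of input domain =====

-- B pools the later subsequences' elements into one set and makes a single
-- membership pass over the first subsequence, instead of A's triple nested loops.

-- ===== PORT A =====
-- inner 'for n in range(len(sublist1)): if sublist1[n] == num_to_look_for: return True'
def pvAInnerN (sublist1 : List Int) (num : Int) : Bool :=
  match sublist1 with
  | [] => false
  | x :: xs => if x == num then true else pvAInnerN xs num

-- 'for m in range(len(sublist)): …'
def pvAInnerM (sublist sublist1 : List Int) : Bool :=
  match sublist with
  | [] => false
  | x :: xs => if pvAInnerN sublist1 x then true else pvAInnerM xs sublist1

-- 'for k in range(1, len(seq_seq)): …' (seq_seq[0] is read inside the loop)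
def pvALoopK (first : List Int) (rest : List (List Int)) : Bool :=
  match rest with
  | [] => false
  | s :: rs => if pvAInnerM first s then true else pvALoopK first rs

def first_is_elsewhere_too (seq_seq : List (List Int)) : Bool :=
  match seq_seq with
  | [] => false
  | first :: rest => pvALoopK first rest

-- ===== PORT B =====
def first_is_elsewhere_too_alt (seq_seq : List (List Int)) : Bool :=
  match seq_seq with
  | [] => false
  | first :: rest =>
    let others : PySem.Set Int := rest.foldl (fun acc sub => PySem.Set.update acc sub) PySem.Set.empty
    first.any (fun x => PySem.Set.contains others x)

-- ===== PRECONDITION & SPEC =====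
def Spec_first_is_elsewhere_too (seq_seq : List (List Int)) (out : Bool) : Prop := out = first_is_elsewhere_too_alt seq_seq
instance (seq_seq : List (List Int)) (out : Bool) : Decidable (Spec_first_is_elsewhere_too seq_seq out) := by unfold Spec_first_is_elsewhere_too; infer_instance

-- ===== CLAIM (what is proved, stated in full; the proofs are below) =====
def Claim_equal_first_is_elsewhere_too : Prop := ∀ (seq_seq : List (List Int)), Dom_first_is_elsewhere_too seq_seq → Spec_first_is_elsewhere_too seq_seq (first_is_elsewhere_too seq_seq)

-- ===== LEMMAS AND PROOFS =====

theorem pvAInnerN_iff (s : List Int) (v : Int) : pvAInnerN s v = true ↔ v ∈ s := by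
  induction s with
  | nil => simp [pvAInnerN]
  | cons x xs ih => simp [pvAInnerN, ih]; tauto

theorem pvAInnerM_iff (f s : List Int) : pvAInnerM f s = true ↔ ∃ x ∈ f, x ∈ s := by
  induction f with
  | nil => simp [pvAInnerM]
  | cons x xs ih => simp [pvAInnerM, pvAInnerN_iff, ih]

theorem pvALoopK_iff (f : List Int) (rest : List (List Int)) :
    pvALoopK f rest = true ↔ ∃ s ∈ rest, ∃ x ∈ f, x ∈ s := by
  induction rest with
  | nil => simp [pvALoopK]
  | cons s rs ih => simp [pvALoopK, pvAInnerM_iff, ih]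

theorem pvSet_foldl_update_mem (rest : List (List Int)) (acc : PySem.Set Int) (x : Int) :
    x ∈ rest.foldl (fun a s => PySem.Set.update a s) acc ↔ x ∈ acc ∨ ∃ s ∈ rest, x ∈ s := by
  induction rest generalizing acc with
  | nil => simp
  | cons s rs ih =>
    simp only [List.foldl_cons, ih, PySem.Set.mem_update]
    simp
    tauto

theorem first_is_elsewhere_too_spec : Claim_equal_first_is_elsewhere_too := by
  intro seq_seq _
  unfold Spec_first_is_elsewhere_too first_is_elsewhere_too first_is_elsewhere_too_alt
  match seq_seq with
  | [] => rfl
  | first :: rest =>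
    rw [Bool.eq_iff_iff]
    rw [pvALoopK_iff]
    simp only [List.any_eq_true, PySem.Set.contains_iff, pvSet_foldl_update_mem,
      PySem.Set.empty, List.not_mem_nil, false_or]
    tauto
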